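-- pv_equiv track=rewrite | github.com/OlgaAlekhina/algorithms | arraySpecial.py | special_array
-- ===== SOURCE A (Python) =====
-- from typing import List
--
-- def special_array(nums: List[int]) -> bool:
--     if len(nums) == 0:
--         return True
--     last_bit1 = nums[0] & 1
--     last_bit2 = nums[1] & 1
--     if last_bit1 == last_bit2:
--         return False
--     for i in range(0, len(nums), 2):
--         if nums[i] & 1 != last_bit1:
--             return False
--     for i in range(1, len(nums), 2):
--         if nums[i] & 1 != last_bit2:
--             return False
--
--     return True
-- ===== SOURCE B (Python) =====
-- def special_array(nums):
--     if not nums: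
--         return True
--     a = nums[0] & 1
--     return all((x & 1) == (a ^ (i & 1)) for i, x in enumerate(nums))
-- ===== Notes on version B (the rewrite author's own statement) =====
-- stated objective: simpler
-- what changed: Replaces A's two separate strided scans (even indices, then odd indices) plus the explicit first-two-parities guard with one single pass over enumerate(nums) checking each element's parity against the expected parity a^(i&1) derived from the first element.
-- outside the precondition, e.g. on special_array([1]): A raises IndexError, B returns True
import Mathlib
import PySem

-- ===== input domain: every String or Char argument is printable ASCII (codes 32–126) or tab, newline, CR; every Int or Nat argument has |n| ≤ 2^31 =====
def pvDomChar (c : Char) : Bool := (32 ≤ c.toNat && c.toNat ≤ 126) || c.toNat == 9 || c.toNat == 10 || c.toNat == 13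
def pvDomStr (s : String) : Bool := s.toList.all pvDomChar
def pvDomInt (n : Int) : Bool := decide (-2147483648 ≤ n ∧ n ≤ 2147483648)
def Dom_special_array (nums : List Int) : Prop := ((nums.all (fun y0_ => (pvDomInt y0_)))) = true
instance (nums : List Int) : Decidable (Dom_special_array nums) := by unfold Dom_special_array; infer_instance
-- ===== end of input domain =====

-- B replaces A's two strided scans (even indices, then odd indices) with one pass over
-- enumerate(nums) checking each element's parity against the expected a ^ (i & 1); same cost, simpler.
-- Return-value equivalence only; neither program mutates its argument.

-- ===== PORT A =====
def special_array (nums : List Int) : Bool :=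
  if nums.length == 0 then true
  else
    let last_bit1 := PySem.Int.band (PySem.List.pyGetD nums 0 0) 1
    let last_bit2 := PySem.Int.band (PySem.List.pyGetD nums 1 0) 1
    if last_bit1 == last_bit2 then false
    else if (PySem.List.pyRange 0 (nums.length : Int) 2).any
              (fun i => PySem.Int.band (PySem.List.pyGetD nums i 0) 1 != last_bit1) then false
    else if (PySem.List.pyRange 1 (nums.length : Int) 2).any
              (fun i => PySem.Int.band (PySem.List.pyGetD nums i 0) 1 != last_bit2) then false
    else true

def special_array_alt (nums : List Int) : Bool :=
  match nums with
  | [] => true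
  | x :: _ =>
    let a := PySem.Int.band x 1
    (PySem.List.enumerate nums 0).all
      (fun p => PySem.Int.band p.2 1 == PySem.Int.bxor a (PySem.Int.band p.1 1))


-- ===== PRECONDITION & SPEC =====
-- A reads nums[1] unconditionally, so it raises IndexError on every length-1 list; Pre_ excludes exactly those.
def Pre_special_array (nums : List Int) : Prop := nums.length ≠ 1
instance (nums : List Int) : Decidable (Pre_special_array nums) := by unfold Pre_special_array; infer_instance
def pvWitness_special_array : List Int := [1, 2, 3, 4]

def Spec_special_array (nums : List Int) (out : Bool) : Prop := out = special_array_alt nums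
instance (nums : List Int) (out : Bool) : Decidable (Spec_special_array nums out) := by unfold Spec_special_array; infer_instance

-- ===== CLAIM (what is proved, stated in full; the proofs are below) =====
def Claim_equal_special_array : Prop := ∀ (nums : List Int), Dom_special_array nums → Pre_special_array nums → Spec_special_array nums (special_array nums)

-- ===== LEMMAS AND PROOFS =====
theorem crux (nums : List Int) (a : Int) :
    ((∀ i ∈ PySem.List.pyRange 0 (nums.length : Int) 2, PySem.Int.band (PySem.List.pyGetD nums i 0) 1 = a)
    ∧ (∀ i ∈ PySem.List.pyRange 1 (nums.length : Int) 2, PySem.Int.band (PySem.List.pyGetD nums i 0) 1 = PySem.Int.bxor a 1))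
    ↔ (∀ (k : Nat) (h : k < nums.length), PySem.Int.band nums[k] 1 = PySem.Int.bxor a (PySem.Int.band (k : Int) 1)) := by
  have hget : ∀ (k : Nat) (h : k < nums.length), PySem.List.pyGetD nums (k : Int) 0 = nums[k] := by
    intro k h
    rw [PySem.List.pyGetD_natCast, List.getD_eq_getElem?_getD, List.getElem?_eq_getElem h]; rfl
  have hk1 : ∀ (k : Nat), PySem.Int.band (k : Int) 1 = ((k % 2 : Nat) : Int) := by
    intro k
    rw [PySem.Int.band_one]
    exact_mod_cast PySem.Int.mod_natCast k 2
  constructor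
  · rintro ⟨h0, h1⟩ k hk
    rw [hk1]
    rcases Nat.mod_two_eq_zero_or_one k with hp | hp
    · rw [hp]
      simp only [Nat.cast_zero, PySem.Int.bxor_zero]
      have := h0 (k : Int) (by
        rw [PySem.List.mem_pyRange_iff_of_pos (by norm_num)]
        refine ⟨by positivity, by exact_mod_cast hk, ?_⟩
        simpa using Int.natCast_dvd_natCast.mpr (Nat.dvd_of_mod_eq_zero hp))
      rwa [hget k hk] at this
    · rw [hp]
      have := h1 (k : Int) (by
        rw [PySem.List.mem_pyRange_iff_of_pos (by norm_num)]
        refine ⟨by exact_mod_cast Nat.one_le_iff_ne_zero.mpr (by omega), by exact_mod_cast hk, by omega⟩)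
      rw [hget k hk] at this
      rw [this]
      norm_num
  · intro h
    constructor
    · intro i hi
      rw [PySem.List.mem_pyRange_iff_of_pos (by norm_num)] at hi
      obtain ⟨h0, hlt, hdvd⟩ := hi
      obtain ⟨k, rfl⟩ : ∃ k : Nat, i = (k : Int) := ⟨i.toNat, (Int.toNat_of_nonneg h0).symm⟩
      have hk : k < nums.length := by exact_mod_cast hlt
      have hmod : k % 2 = 0 := by
        have : (2:Int) ∣ (k:Int) := by simpa using hdvd
        omega
      rw [hget k hk, h k hk, hk1, hmod]
      simp
    · intro i hi
      rw [PySem.List.mem_pyRange_iff_of_pos (by norm_num)] at hi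
      obtain ⟨h0, hlt, hdvd⟩ := hi
      obtain ⟨k, rfl⟩ : ∃ k : Nat, i = (k : Int) := ⟨i.toNat, (Int.toNat_of_nonneg (by omega)).symm⟩
      have hk : k < nums.length := by exact_mod_cast hlt
      have hmod : k % 2 = 1 := by
        obtain ⟨c, hc⟩ := hdvd
        omega
      rw [hget k hk, h k hk, hk1, hmod]
      norm_num

theorem alt_iff (nums : List Int) (a : Int) :
    ((PySem.List.enumerate nums 0).all
      (fun p => PySem.Int.band p.2 1 == PySem.Int.bxor a (PySem.Int.band p.1 1)) = true)
    ↔ (∀ (k : Nat) (h : k < nums.length), PySem.Int.band nums[k] 1 = PySem.Int.bxor a (PySem.Int.band (k : Int) 1)) := by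
  rw [List.all_eq_true]
  constructor
  · intro h k hk
    have := h ((k : Int), nums[k]) ((PySem.List.mem_enumerate_iff nums 0 _).mpr ⟨k, hk, by simp⟩)
    simpa using this
  · rintro h p hp
    rw [PySem.List.mem_enumerate_iff] at hp
    obtain ⟨k, hk, rfl⟩ := hp
    simpa using h k hk

theorem neq_case (nums : List Int) (a b : Int) (hxor : b = PySem.Int.bxor a 1) :
    (if (PySem.List.pyRange 0 (nums.length : Int) 2).any
          (fun i => PySem.Int.band (PySem.List.pyGetD nums i 0) 1 != a) then false
     else if (PySem.List.pyRange 1 (nums.length : Int) 2).any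
          (fun i => PySem.Int.band (PySem.List.pyGetD nums i 0) 1 != b) then false
     else true)
    = (PySem.List.enumerate nums 0).all
        (fun p => PySem.Int.band p.2 1 == PySem.Int.bxor a (PySem.Int.band p.1 1)) := by
  subst hxor
  rw [Bool.eq_iff_iff, alt_iff, ← crux]
  cases h1 : (PySem.List.pyRange 0 (nums.length : Int) 2).any
      (fun i => PySem.Int.band (PySem.List.pyGetD nums i 0) 1 != a) <;>
    cases h2 : (PySem.List.pyRange 1 (nums.length : Int) 2).any
      (fun i => PySem.Int.band (PySem.List.pyGetD nums i 0) 1 != PySem.Int.bxor a 1) <;>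
    simp_all [List.any_eq_true, List.any_eq_false]

theorem special_array_agree (nums : List Int) (hpre : nums.length ≠ 1) :
    special_array nums = special_array_alt nums := by
  match nums with
  | [] => rfl
  | [x] => exact absurd rfl hpre
  | x :: y :: rest =>
    have h1 : PySem.List.pyGetD (x :: y :: rest) 1 0 = y := by
      rw [show (1:Int) = ((1:Nat):Int) from rfl, PySem.List.pyGetD_natCast]; rfl
    simp only [special_array, special_array_alt, h1, PySem.List.pyGetD_zero_cons, beq_iff_eq]
    rw [if_neg (by simp)]
    rcases PySem.Int.mod_two_eq x with hx | hx <;> rcases PySem.Int.mod_two_eq y with hy | hy <;>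
      have hx' : PySem.Int.band x 1 = _ := (PySem.Int.band_one x).trans hx <;>
      have hy' : PySem.Int.band y 1 = _ := (PySem.Int.band_one y).trans hy <;>
      rw [hx', hy']
    · -- 0 0 : equal parities, A returns false
      rw [if_pos rfl]
      simp [PySem.List.enumerate_cons]
      intro _ h2
      rw [hy'] at h2
      exact absurd h2 (by decide)
    · rw [if_neg (by decide)]
      exact neq_case _ 0 1 (by decide)
    · rw [if_neg (by decide)]
      exact neq_case _ 1 0 (by decide)
    · rw [if_pos rfl]
      simp [PySem.List.enumerate_cons]
      intro _ h2
      rw [hy'] at h2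
      exact absurd h2 (by decide)

-- ===== VERDICT (by name: the statement is the Claim_ definition above) =====
theorem special_array_spec : Claim_equal_special_array := by
  intro nums _ hpre
  unfold Spec_special_array
  exact special_array_agree nums hpre
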